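-- pv_equiv track=rewrite | github.com/jonas-vriend/fs_project | backend/app/utils.py | find_solution
-- ===== SOURCE A (Python) =====
-- def find_solution(subsets, target=0, off_by_thresh=0, penalize_indices=None):
--     """
--     Finds the best subset and +/- sign combo that sums to target.
--     Prefers exact matches, and scores them. Falls back to near matches if needed.
--     """
--     if penalize_indices is None:
--         penalize_indices = set()
--
--     exact_matches = []
--     near_matches = []
--
--     def try_signs(subset):
--         n = len(subset)
--         results = []
--
--         def recurse(i, current_sum, current_combo):
--             if i == n:
--                 off_by = abs(current_sum - target)
--                 if off_by <= off_by_thresh: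
--                     results.append((current_combo[:], off_by))
--                 return
--
--             index, value = subset[i]
--
--             # Try adding
--             recurse(i + 1, current_sum + value, current_combo + [(index, True)])
--             # Try subtracting
--             recurse(i + 1, current_sum - value, current_combo + [(index, False)])
--
--         recurse(0, 0, [])
--         return results
--
--     for subset in subsets:
--         for combo, off_by in try_signs(subset):
--             if off_by == 0:
--                 exact_matches.append(combo)
--             else:
--                 near_matches.append((combo, off_by))
--
--     def score(combo):
--         indices = [i for i, _ in combo]
--         num_adds = sum(1 for _, sign in combo if sign)
--         num_subs = sum(1 for _, sign in combo if not sign)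
--         subtotal_penalty = sum(1 for i in indices if i in penalize_indices)
--
--         return (
--             len(combo) * 10             # prefer using more values
--             + num_adds * 5              # prefer addition
--             - num_subs * 2              # slightly penalize subtraction
--             - subtotal_penalty * 50     # heavily penalize use of subtotal lines
--         )
--
--     # Score and return best exact match if any
--     if exact_matches:
--         return max(exact_matches, key=score)
--
--     # Otherwise, score and return best near match
--     if near_matches:
--         return max((combo for combo, _ in near_matches), key=score)
--
--     return None  # No valid solution found
-- ===== SOURCE B (Python) =====
-- def find_solution(subsets, target=0, off_by_thresh=0, penalize_indices=None):
--     """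
--     Iterative re-implementation: enumerates sign combos per subset by bitmask
--     (bit 0 of the sign pattern = first element, mask bit 0 -> '+'), instead of DFS.
--     """
--     if penalize_indices is None:
--         penalize_indices = set()
--
--     exact_matches = []
--     near_matches = []
--
--     for subset in subsets:
--         n = len(subset)
--         for mask in range(1 << n):
--             total = 0
--             combo = []
--             p = 1 << n
--             for index, value in subset:
--                 p //= 2
--                 plus = (mask // p) % 2 == 0
--                 total += value if plus else -value
--                 combo.append((index, plus))
--             off_by = abs(total - target)
--             if off_by <= off_by_thresh:
--                 if off_by == 0:
--                     exact_matches.append(combo)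
--                 else:
--                     near_matches.append((combo, off_by))
--
--     def score(combo):
--         num_adds = sum(1 for _, sign in combo if sign)
--         num_subs = len(combo) - num_adds
--         penalty = sum(1 for index, _ in combo if index in penalize_indices)
--         return len(combo) * 10 + num_adds * 5 - num_subs * 2 - penalty * 50
--
--     if exact_matches:
--         return max(exact_matches, key=score)
--     if near_matches:
--         return max((c for c, _ in near_matches), key=score)
--     return None
-- ===== Notes on version B (the rewrite author's own statement) =====
-- stated objective: alternative
-- what changed: Replaces A's nested recursive DFS over +/- sign choices (closure appending into a shared results list) with a flat iterative bitmask loop: for each subset every mask in range(2**n) is decoded bit-by-bit (highest bit = first element, 0-bit = '+') into the same signed total and combo, classified inline into exact/near matches; the scoring/max selection is kept.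
import Mathlib
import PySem

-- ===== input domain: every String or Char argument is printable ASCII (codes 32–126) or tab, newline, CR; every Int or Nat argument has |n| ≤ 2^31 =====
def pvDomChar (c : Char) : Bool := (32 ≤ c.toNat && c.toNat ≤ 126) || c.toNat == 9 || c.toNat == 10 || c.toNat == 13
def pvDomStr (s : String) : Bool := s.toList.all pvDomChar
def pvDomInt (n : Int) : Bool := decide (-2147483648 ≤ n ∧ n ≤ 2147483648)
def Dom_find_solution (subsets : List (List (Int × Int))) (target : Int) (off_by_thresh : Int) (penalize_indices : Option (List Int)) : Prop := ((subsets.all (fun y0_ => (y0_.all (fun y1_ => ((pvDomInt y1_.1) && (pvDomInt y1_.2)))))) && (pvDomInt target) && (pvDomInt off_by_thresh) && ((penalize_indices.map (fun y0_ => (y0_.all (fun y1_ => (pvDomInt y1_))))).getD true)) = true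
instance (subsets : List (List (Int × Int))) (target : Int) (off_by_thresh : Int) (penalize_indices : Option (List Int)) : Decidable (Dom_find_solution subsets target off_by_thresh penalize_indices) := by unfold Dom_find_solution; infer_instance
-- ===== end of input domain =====

-- B replaces A's recursive DFS over +/- signs by an iterative bitmask enumeration of the
-- same sign combinations (alternative decomposition, same enumeration order); return value only.

-- ===== PORT A =====
-- A's inner 'recurse': structural recursion over the remaining subset; the two recursive
-- calls' results are concatenated in order (Python appends into 'results' in DFS order).
def pvRecurse (target off_by_thresh : Int) : List (Int × Int) → Int → List (Int × Bool) → List (List (Int × Bool) × Int)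
  | [], current_sum, current_combo =>
      let off_by := |current_sum - target|
      if off_by ≤ off_by_thresh then [(current_combo, off_by)] else []
  | (index, value) :: rest, current_sum, current_combo =>
      pvRecurse target off_by_thresh rest (current_sum + value) (current_combo ++ [(index, true)]) ++
      pvRecurse target off_by_thresh rest (current_sum - value) (current_combo ++ [(index, false)])

-- A's 'score' (the 1-sums are counts)
def pvScoreA (pen : List Int) (combo : List (Int × Bool)) : Int :=
  let indices := combo.map (fun p => p.1)
  let num_adds : Int := combo.countP (fun p => p.2)
  let num_subs : Int := combo.countP (fun p => !p.2)
  let subtotal_penalty : Int := indices.countP (fun i => pen.contains i)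
  (combo.length : Int) * 10 + num_adds * 5 - num_subs * 2 - subtotal_penalty * 50

def find_solution (subsets : List (List (Int × Int))) (target : Int) (off_by_thresh : Int) (penalize_indices : Option (List Int)) : Option (List (Int × Bool)) :=
  let pen := penalize_indices.getD []
  let em_nm := subsets.foldl (fun st subset =>
      (pvRecurse target off_by_thresh subset 0 []).foldl (fun st r =>
        if r.2 == 0 then (st.1 ++ [r.1], st.2) else (st.1, st.2 ++ [r])) st)
    (([] : List (List (Int × Bool))), ([] : List (List (Int × Bool) × Int)))
  match PySem.List.max? em_nm.1 (pvScoreA pen) with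
  | some m => some m
  | none =>
    match PySem.List.max? (em_nm.2.map (fun p => p.1)) (pvScoreA pen) with
    | some m => some m
    | none => none

-- ===== PORT B =====
def pvScoreB (pen : List Int) (combo : List (Int × Bool)) : Int :=
  let num_adds : Int := combo.countP (fun p => p.2)
  let num_subs : Int := (combo.length : Int) - num_adds
  let penalty : Int := combo.countP (fun p => pen.contains p.1)
  (combo.length : Int) * 10 + num_adds * 5 - num_subs * 2 - penalty * 50

def find_solution_alt (subsets : List (List (Int × Int))) (target : Int) (off_by_thresh : Int) (penalize_indices : Option (List Int)) : Option (List (Int × Bool)) :=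
  let pen := penalize_indices.getD []
  let em_nm := subsets.foldl (fun st subset =>
      let n := subset.length
      (PySem.List.pyRange 0 ((2 : Int) ^ n) 1).foldl (fun st mask =>
        let tpc := subset.foldl (fun (acc : Int × Int × List (Int × Bool)) iv =>
            let p := PySem.Int.floordiv acc.1 2
            let plus := PySem.Int.mod (PySem.Int.floordiv mask p) 2 == 0
            (p, acc.2.1 + (if plus then iv.2 else -iv.2), acc.2.2 ++ [(iv.1, plus)]))
          (((2 : Int) ^ n, 0, []) : Int × Int × List (Int × Bool))
        let off_by := |tpc.2.1 - target|
        if off_by ≤ off_by_thresh then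
          if off_by == 0 then (st.1 ++ [tpc.2.2], st.2) else (st.1, st.2 ++ [(tpc.2.2, off_by)])
        else st) st)
    (([] : List (List (Int × Bool))), ([] : List (List (Int × Bool) × Int)))
  match PySem.List.max? em_nm.1 (pvScoreB pen) with
  | some m => some m
  | none =>
    match PySem.List.max? (em_nm.2.map (fun p => p.1)) (pvScoreB pen) with
    | none => none
    | some m => some m

-- ===== PRECONDITION & SPEC =====
def Spec_find_solution (subsets : List (List (Int × Int))) (target : Int) (off_by_thresh : Int) (penalize_indices : Option (List Int)) (out : Option (List (Int × Bool))) : Prop := out = find_solution_alt subsets target off_by_thresh penalize_indices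
instance (subsets : List (List (Int × Int))) (target : Int) (off_by_thresh : Int) (penalize_indices : Option (List Int)) (out : Option (List (Int × Bool))) : Decidable (Spec_find_solution subsets target off_by_thresh penalize_indices out) := by unfold Spec_find_solution; infer_instance

-- ===== CLAIM (what is proved, stated in full; the proofs are below) =====
def Claim_equal_find_solution : Prop := ∀ (subsets : List (List (Int × Int))) (target : Int) (off_by_thresh : Int) (penalize_indices : Option (List Int)), Dom_find_solution subsets target off_by_thresh penalize_indices → Spec_find_solution subsets target off_by_thresh penalize_indices (find_solution subsets target off_by_thresh penalize_indices)

-- ===== LEMMAS AND PROOFS =====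

-- Proof-only recursion computing the (total, combo) a mask denotes (bit of weight
-- 2^(rest.length) decides the current element's sign; 0 = '+').
def pvBuildR : List (Int × Int) → Int → Int → List (Int × Bool) → Int × List (Int × Bool)
  | [], _, s, c => (s, c)
  | (idx, v) :: rest, mask, s, c =>
      let plus := (mask / 2 ^ rest.length) % 2 == 0
      pvBuildR rest mask (s + if plus then v else -v) (c ++ [(idx, plus)])

def pvCheck (target thresh : Int) (r : Int × List (Int × Bool)) : Option (List (Int × Bool) × Int) :=
  if |r.1 - target| ≤ thresh then some (r.2, |r.1 - target|) else none

-- B's inner foldl computes pvBuildR (the p-state is the power of two of the current bit)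
theorem pv_fold_build (mask : Int) : ∀ (l : List (Int × Int)) (s : Int) (c : List (Int × Bool)),
    l.foldl (fun (acc : Int × Int × List (Int × Bool)) iv =>
        let p := PySem.Int.floordiv acc.1 2
        let plus := PySem.Int.mod (PySem.Int.floordiv mask p) 2 == 0
        (p, acc.2.1 + (if plus then iv.2 else -iv.2), acc.2.2 ++ [(iv.1, plus)]))
      (((2 : Int) ^ l.length, s, c))
    = (1, (pvBuildR l mask s c).1, (pvBuildR l mask s c).2) := by
  intro l
  induction l with
  | nil => intro s c; rfl
  | cons x t ih =>
    intro s c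
    obtain ⟨idx, v⟩ := x
    rw [List.foldl_cons]
    have hp : PySem.Int.floordiv ((2 : Int) ^ (t.length + 1)) 2 = (2 : Int) ^ t.length := by
      rw [PySem.Int.floordiv_eq_ediv_of_pos (by norm_num)]
      rw [pow_succ]
      exact Int.mul_ediv_cancel _ (by norm_num)
    have hq : PySem.Int.mod (PySem.Int.floordiv mask ((2 : Int) ^ t.length)) 2
        = (mask / 2 ^ t.length) % 2 := by
      rw [PySem.Int.floordiv_eq_ediv_of_pos (by positivity), PySem.Int.mod_eq_emod_of_pos (by norm_num)]
    simp only [List.length_cons, hp, hq]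
    rw [ih]
    rfl

-- mask bits above position l.length do not matter
theorem pv_build_high : ∀ (l : List (Int × Int)) (m j s : Int) (c : List (Int × Bool)),
    pvBuildR l (m + 2 ^ l.length * j) s c = pvBuildR l m s c := by
  intro l
  induction l with
  | nil => intro m j s c; rfl
  | cons x t ih =>
    intro m j s c
    obtain ⟨idx, v⟩ := x
    have h2 : m + 2 ^ ((idx, v) :: t).length * j = m + 2 ^ t.length * (2 * j) := by
      simp only [List.length_cons, pow_succ]; ring
    have hbit : (m + 2 ^ t.length * (2 * j)) / 2 ^ t.length % 2 = m / 2 ^ t.length % 2 := by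
      rw [mul_comm ((2:Int) ^ t.length) (2 * j), Int.add_mul_ediv_right _ _ (by positivity : (2:Int) ^ t.length ≠ 0)]
      omega
    rw [h2]
    simp only [pvBuildR, hbit]
    exact ih m (2 * j) _ _

theorem pv_build_cons_low (idx v : Int) (t : List (Int × Int)) (k s : Int) (c : List (Int × Bool))
    (h0 : 0 ≤ k) (h1 : k < 2 ^ t.length) :
    pvBuildR ((idx, v) :: t) k s c = pvBuildR t k (s + v) (c ++ [(idx, true)]) := by
  have hz : k / 2 ^ t.length = 0 := Int.ediv_eq_zero_of_lt h0 h1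
  simp [pvBuildR, hz]

theorem pv_build_cons_high (idx v : Int) (t : List (Int × Int)) (k s : Int) (c : List (Int × Bool))
    (h0 : 0 ≤ k) (h1 : k < 2 ^ t.length) :
    pvBuildR ((idx, v) :: t) (2 ^ t.length + k) s c = pvBuildR t k (s - v) (c ++ [(idx, false)]) := by
  have hz : k / 2 ^ t.length = 0 := Int.ediv_eq_zero_of_lt h0 h1
  have hone : (2 ^ t.length + k) / 2 ^ t.length = 1 := by
    have h := Int.add_mul_ediv_right k 1 (by positivity : (2:Int) ^ t.length ≠ 0)
    rw [one_mul] at h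
    rw [add_comm, h, hz]
    norm_num
  have hhigh : pvBuildR t (2 ^ t.length + k) (s + -v) (c ++ [(idx, false)])
      = pvBuildR t k (s + -v) (c ++ [(idx, false)]) := by
    have := pv_build_high t k 1 (s + -v) (c ++ [(idx, false)])
    rw [mul_one] at this
    rw [add_comm]
    exact this
  simp only [pvBuildR, hone]
  norm_num
  rw [show ((1:Int) == 0) = false from rfl]
  rw [hhigh, sub_eq_add_neg]

-- DFS = mask enumeration (masks 0..2^n-1 in order, highest bit = first element)
theorem pv_main (target thresh : Int) : ∀ (l : List (Int × Int)) (s : Int) (c : List (Int × Bool)),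
    pvRecurse target thresh l s c
      = (List.range (2 ^ l.length)).filterMap (fun (k : ℕ) => pvCheck target thresh (pvBuildR l (k : Int) s c)) := by
  intro l
  induction l with
  | nil =>
    intro s c
    show _ = (List.range 1).filterMap _
    rw [List.range_succ, List.range_zero, List.nil_append, List.filterMap_cons, List.filterMap_nil]
    simp only [pvRecurse, pvCheck, pvBuildR]
    split_ifs <;> rfl
  | cons x t ih =>
    intro s c
    obtain ⟨idx, v⟩ := x
    have hsplit : (2 : ℕ) ^ ((idx, v) :: t).length = 2 ^ t.length + 2 ^ t.length := by
      rw [List.length_cons, pow_succ]; ring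
    rw [hsplit, List.range_add, List.filterMap_append, List.filterMap_map]
    have hlow : (List.range (2 ^ t.length)).filterMap
        (fun (k : ℕ) => pvCheck target thresh (pvBuildR ((idx, v) :: t) (k : Int) s c))
        = (List.range (2 ^ t.length)).filterMap
        (fun (k : ℕ) => pvCheck target thresh (pvBuildR t (k : Int) (s + v) (c ++ [(idx, true)]))) := by
      apply List.filterMap_congr
      intro k hk
      rw [List.mem_range] at hk
      rw [pv_build_cons_low idx v t k s c (by positivity) (by exact_mod_cast hk)]
    have hhigh : (List.range (2 ^ t.length)).filterMap
        ((fun (k : ℕ) => pvCheck target thresh (pvBuildR ((idx, v) :: t) (k : Int) s c)) ∘ (fun k => 2 ^ t.length + k))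
        = (List.range (2 ^ t.length)).filterMap
        (fun (k : ℕ) => pvCheck target thresh (pvBuildR t (k : Int) (s - v) (c ++ [(idx, false)]))) := by
      apply List.filterMap_congr
      intro k hk
      rw [List.mem_range] at hk
      show pvCheck target thresh (pvBuildR ((idx, v) :: t) ((2 ^ t.length + k : ℕ) : Int) s c) = _
      rw [show (((2 ^ t.length + k : ℕ)) : Int) = 2 ^ t.length + (k : Int) by push_cast; ring]
      rw [pv_build_cons_high idx v t k s c (by positivity) (by exact_mod_cast hk)]
    rw [hlow, hhigh, ← ih, ← ih]
    rfl

theorem pv_foldl_filterMap {α β γ : Type} (f : α → Option β) (g : γ → β → γ) :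
    ∀ (l : List α) (st : γ),
    (l.filterMap f).foldl g st = l.foldl (fun st a => match f a with | some b => g st b | none => st) st := by
  intro l
  induction l with
  | nil => intro st; rfl
  | cons x t ih =>
    intro st
    simp only [List.filterMap_cons]
    cases h : f x <;> simp [List.foldl_cons, h, ih]

theorem pv_scores_eq (pen : List Int) : pvScoreA pen = pvScoreB pen := by
  funext combo
  simp only [pvScoreA, pvScoreB, List.countP_map]
  have h : combo.countP (fun p => p.2) + combo.countP (fun p => !p.2) = combo.length := by
    induction combo with
    | nil => rfl
    | cons p t ih =>
      simp only [List.countP_cons, List.length_cons]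
      cases p.2 <;> simp <;> omega
  have hc : combo.countP ((fun i => pen.contains i) ∘ fun p => p.1)
      = combo.countP (fun p => pen.contains p.1) := rfl
  rw [hc]
  omega

-- B's per-subset mask loop = A's classification loop over the DFS results
theorem pv_inner (target thresh : Int) (subset : List (Int × Int))
    (st : List (List (Int × Bool)) × List (List (Int × Bool) × Int)) :
    (PySem.List.pyRange 0 ((2 : Int) ^ subset.length) 1).foldl (fun st mask =>
        let tpc := subset.foldl (fun (acc : Int × Int × List (Int × Bool)) iv =>
            let p := PySem.Int.floordiv acc.1 2
            let plus := PySem.Int.mod (PySem.Int.floordiv mask p) 2 == 0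
            (p, acc.2.1 + (if plus then iv.2 else -iv.2), acc.2.2 ++ [(iv.1, plus)]))
          (((2 : Int) ^ subset.length, 0, []) : Int × Int × List (Int × Bool))
        let off_by := |tpc.2.1 - target|
        if off_by ≤ thresh then
          if off_by == 0 then (st.1 ++ [tpc.2.2], st.2) else (st.1, st.2 ++ [(tpc.2.2, off_by)])
        else st) st
    = (pvRecurse target thresh subset 0 []).foldl (fun st r =>
        if r.2 == 0 then (st.1 ++ [r.1], st.2) else (st.1, st.2 ++ [r])) st := by
  have hcast : ((2 : Int) ^ subset.length - 0).toNat = 2 ^ subset.length := by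
    rw [sub_zero, show ((2 : Int) ^ subset.length) = ((2 ^ subset.length : ℕ) : Int) by push_cast; ring,
      Int.toNat_natCast]
  rw [PySem.List.pyRange_one, hcast, List.foldl_map,
    pv_main target thresh subset 0 [], pv_foldl_filterMap]
  apply PySem.List.foldl_congr_mem
  intro acc k _
  rw [pv_fold_build ((0 : Int) + (k : Int)) subset 0 []]
  simp only [zero_add, pvCheck]
  split_ifs <;> simp_all

-- ===== VERDICT (by name: the statement is the Claim_ definition above) =====
theorem find_solution_spec : Claim_equal_find_solution := by
  intro subsets target off_by_thresh penalize_indices _hdom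
  unfold Spec_find_solution find_solution find_solution_alt
  simp only [pv_scores_eq, pv_inner]
  generalize PySem.List.max? (List.foldl
        (fun st subset =>
          List.foldl (fun st r => if (r.2 == 0) = true then (st.1 ++ [r.1], st.2) else (st.1, st.2 ++ [r])) st
            (pvRecurse target off_by_thresh subset 0 []))
        ([], []) subsets).1
      (pvScoreB (penalize_indices.getD [])) = x
  generalize PySem.List.max? (List.map (fun p => p.1)
        (List.foldl
          (fun st subset =>
            List.foldl (fun st r => if (r.2 == 0) = true then (st.1 ++ [r.1], st.2) else (st.1, st.2 ++ [r])) st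
              (pvRecurse target off_by_thresh subset 0 []))
          ([], []) subsets).2)
      (pvScoreB (penalize_indices.getD [])) = y
  cases x <;> cases y <;> rfl
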